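-- pv_equiv track=rewrite | github.com/aytacsavrun/ichnaea | ichnaea/api/locate/wifi.py | filter_bssids_by_similarity
-- ===== SOURCE A (Python) =====
-- def cluster_elements(items, distance_fn, threshold):
--     """
--     Generic pairwise clustering routine.
--
--     :param items: A list of elements to cluster.
--     :param distance_fn: A pairwise distance function over elements.
--     :param threshold: A numeric threshold for clustering;
--                       clusters P, Q will be joined if
--                       distance_fn(a,b) <= threshold,
--                       for any a in P, b in Q.
--
--     :returns: A list of lists of elements, each sub-list being a cluster.
--     """
--     distance_matrix = [[distance_fn(a, b) for a in items] for b in items]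
--     clusters = [[i] for i in range(len(items))]
--
--     def cluster_distance(a, b):
--         return min([distance_matrix[i][j] for i in a for j in b])
--
--     merged_one = True
--     while merged_one:
--         merged_one = False
--         for i in range(len(clusters)):
--             if merged_one:
--                 break
--             for j in range(len(clusters)):
--                 if merged_one:
--                     break
--                 if i == j:
--                     continue
--                 a = clusters[i]
--                 b = clusters[j]
--                 if cluster_distance(a, b) <= threshold:
--                     clusters.pop(j)
--                     a.extend(b)
--                     merged_one = True
--
--     return [[items[i] for i in c] for c in clusters]
--
-- def filter_bssids_by_similarity(bssids, distance_threshold=2):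
--     """
--     Cluster BSSIDs by "similarity" (hamming or arithmetic distance);
--     return one BSSID from each cluster. The distance threshold is
--     hard-wired to 2, meaning that two BSSIDs are clustered together
--     if they are within a numeric difference of 2 of one another or
--     a hamming distance of 2.
--     """
--
--     def bytes_of_hex_string(hs):
--         return [int(hs[i:i + 2], 16) for i in range(0, len(hs), 2)]
--
--     def hamming_distance(a, b):
--         h = 0
--         v = a ^ b
--         while v:
--             h += 1
--             v &= v - 1
--         return h
--
--     def hamming_or_arithmetic_byte_difference(a, b):
--         return min(abs(a - b), hamming_distance(a, b))
--
--     def bssid_difference(a, b):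
--         abytes = bytes_of_hex_string(a)
--         bbytes = bytes_of_hex_string(b)
--         return sum(hamming_or_arithmetic_byte_difference(a, b) for
--                    (a, b) in zip(abytes, bbytes))
--
--     clusters = cluster_elements(
--         bssids, bssid_difference, distance_threshold)
--     return [cluster[0] for cluster in clusters]
-- ===== SOURCE B (Python) =====
-- def filter_bssids_by_similarity(bssids, distance_threshold=2):
--     """Threshold-graph connected components: precompute the pairwise adjacency
--     matrix once, then emit each index whose component was not seen before
--     (its smallest index), growing the component by fixpoint expansion."""
--
--     def bytes_of_hex_string(hs):
--         return [int(hs[i:i + 2], 16) for i in range(0, len(hs), 2)]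
--
--     def hamming_distance(a, b):
--         h = 0
--         v = a ^ b
--         while v:
--             h += 1
--             v &= v - 1
--         return h
--
--     def byte_difference(a, b):
--         return min(abs(a - b), hamming_distance(a, b))
--
--     n = len(bssids)
--     byts = [bytes_of_hex_string(s) for s in bssids]
--     adj = [[sum(byte_difference(x, y) for x, y in zip(p, q)) <= distance_threshold
--             for q in byts] for p in byts]
--     seen = set()
--     result = []
--     for i in range(n):
--         if i in seen:
--             continue
--         result.append(bssids[i])
--         comp = {i}
--         while True:
--             add = {j for j in range(n)
--                    if j not in comp and any(adj[k][j] for k in comp)}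
--             if not add:
--                 break
--             comp |= add
--         seen |= comp
--     return result
-- ===== Notes on version B (the rewrite author's own statement) =====
-- stated objective: faster
-- what changed: Replaces the merge-until-stable clustering loop (which rescans all cluster pairs and recomputes pairwise minima after every merge, re-deriving byte distances from a matrix built by re-parsing strings n^2 times) by one precomputed boolean adjacency matrix plus a connected-component fixpoint expansion that visits each component once and emits its smallest index.
-- outside the precondition, e.g. on filter_bssids_by_similarity(['-1', '-1'], 2): A returns ['-1'], B returns ['-1']; on filter_bssids_by_similarity(['7 '], 2): A returns ['7 '], B returns ['7 ']
import Mathlib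
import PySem

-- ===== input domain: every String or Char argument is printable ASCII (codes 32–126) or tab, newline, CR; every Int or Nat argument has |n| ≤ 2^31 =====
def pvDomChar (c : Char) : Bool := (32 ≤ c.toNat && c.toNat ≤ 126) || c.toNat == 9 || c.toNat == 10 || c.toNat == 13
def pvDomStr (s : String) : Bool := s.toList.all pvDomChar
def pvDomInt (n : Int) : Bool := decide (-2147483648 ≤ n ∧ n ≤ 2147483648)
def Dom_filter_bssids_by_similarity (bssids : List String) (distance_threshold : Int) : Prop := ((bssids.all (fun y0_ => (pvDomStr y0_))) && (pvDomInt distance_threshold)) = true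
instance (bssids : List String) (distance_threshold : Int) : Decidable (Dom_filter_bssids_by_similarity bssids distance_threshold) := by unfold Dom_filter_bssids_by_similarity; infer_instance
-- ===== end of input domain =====

-- B replaces A's merge-until-stable clustering loop by a one-pass connected-component
-- scan over a precomputed adjacency matrix (objective: faster merge phase).

-- ===== shared byte/distance helpers (these helper functions are textually identical in both Pythons) =====

-- hs[i:i+2] for i in range(0, len(hs), 2): the 2-character chunks (last one may have 1 char)
def hexChunks : List Char → List (List Char)
  | [] => []
  | [c] => [[c]]
  | a :: b :: r => [a, b] :: hexChunks r

-- int(chunk, 16); the `.getD 0` is unreachable under Pre_ (every chunk parses)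
def bytesOfHex (cs : List Char) : List Int :=
  (hexChunks cs).map (fun ch => (PySem.Int.ofCharsBase? ch 16).getD 0)

-- `while v: h += 1; v &= v - 1` — exact for 0 ≤ v (Pre_ makes all bytes nonnegative)
def hammingLoop (v h : Nat) : Nat :=
  if hv : v = 0 then h else hammingLoop (v &&& (v - 1)) (h + 1)
termination_by v
decreasing_by
  have h1 : v &&& (v - 1) ≤ v - 1 := Nat.and_le_right
  omega

def hamming (a b : Int) : Int := (hammingLoop (PySem.Int.bxor a b).toNat 0 : Nat)

def byteDiff (a b : Int) : Int := min |a - b| (hamming a b)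

-- sum(byte_difference(x, y) for (x, y) in zip(p, q))
def pairDiff (p q : List Int) : Int := ((p.zip q).map (fun x => byteDiff x.1 x.2)).sum

def bssidDiff (a b : String) : Int := pairDiff (bytesOfHex a.toList) (bytesOfHex b.toList)

-- ===== PORT A =====

-- distance_matrix = [[distance_fn(a, b) for a in items] for b in items]
def matrixOf (bssids : List String) : List (List Int) :=
  bssids.map (fun b => bssids.map (fun a => bssidDiff a b))

-- min([distance_matrix[i][j] for i in a for j in b]); indices always in range, lists nonempty
def clusterDist (matrix : List (List Int)) (a b : List Nat) : Int :=
  ((a.flatMap (fun i => b.map (fun j => (matrix.getD i []).getD j 0))).min?).getD 0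

def mergeCond (matrix : List (List Int)) (t : Int) (clusters : List (List Nat))
    (i j : Nat) : Bool :=
  !(i == j) && decide (clusterDist matrix (clusters.getD i []) (clusters.getD j []) ≤ t)

-- the double `for i … for j … break`-on-first-hit scan
def findPair (p : Nat → Nat → Bool) : List Nat → List Nat → Option (Nat × Nat)
  | [], _ => none
  | i :: is, js =>
    match js.find? (p i) with
    | some j => some (i, j)
    | none => findPair p is js

def findMerge (matrix : List (List Int)) (t : Int) (clusters : List (List Nat)) :
    Option (Nat × Nat) :=
  findPair (mergeCond matrix t clusters) (List.range clusters.length) (List.range clusters.length)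

-- `while merged_one:` — clusters.pop(j); a.extend(b); restart the scan
def mergeLoop (matrix : List (List Int)) (t : Int) (clusters : List (List Nat)) :
    List (List Nat) :=
  match findMerge matrix t clusters with
  | none => clusters
  | some (i, j) =>
    if h : j < clusters.length then
      mergeLoop matrix t
        ((clusters.eraseIdx j).set (if j < i then i - 1 else i)
          (clusters.getD i [] ++ clusters.getD j []))
    else clusters  -- unreachable totality guard (findMerge only returns indices < length)
termination_by clusters.length
decreasing_by
  rw [List.length_set, List.length_eraseIdx_of_lt h]
  omega

def filter_bssids_by_similarity (bssids : List String) (distance_threshold : Int) : List String :=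
  (mergeLoop (matrixOf bssids) distance_threshold
      ((List.range bssids.length).map (fun i => [i]))).map
    (fun c => bssids.getD (c.headD 0) "")

-- ===== PORT B =====

-- adj = [[bssid_difference(p, q) <= t for q in byts] for p in byts]
def adjOf (byts : List (List Int)) (t : Int) : List (List Bool) :=
  byts.map (fun p => byts.map (fun q => decide (pairDiff p q ≤ t)))

-- add = {j for j in range(n) if j not in comp and any(adj[k][j] for k in comp)}
def expandOnce (adj : List (List Bool)) (n : Nat) (comp : List Nat) : List Nat :=
  (List.range n).filter
    (fun j => !comp.contains j && comp.any (fun k => (adj.getD k []).getD j false))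

-- `while True: … if not add: break; comp |= add` — fuel n is always enough (comp grows each round)
def closureLoop (adj : List (List Bool)) (n : Nat) : Nat → List Nat → List Nat
  | 0, comp => comp
  | f + 1, comp =>
    if (expandOnce adj n comp).isEmpty then comp
    else closureLoop adj n f (comp ++ expandOnce adj n comp)

-- loop body: skip seen indices, else emit bssids[i] and absorb its component
def scanStep (adj : List (List Bool)) (n : Nat) (bssids : List String)
    (st : PySem.Set Nat × List String) (i : Nat) : PySem.Set Nat × List String :=
  if PySem.Set.contains st.1 i then st
  else (PySem.Set.union st.1 (closureLoop adj n n [i]), st.2 ++ [bssids.getD i ""])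

def filter_bssids_by_similarity_alt (bssids : List String) (distance_threshold : Int) : List String :=
  let n := bssids.length
  let adj := adjOf (bssids.map (fun s => bytesOfHex s.toList)) distance_threshold
  ((List.range n).foldl (scanStep adj n bssids) (PySem.Set.empty, [])).2

-- ===== PRECONDITION & SPEC =====

-- Pre_ restricts every bssid to hexadecimal digits only: outside that, int(chunk, 16) can raise
-- ValueError, and signed chunks can parse negative and make A's hamming loop `v &= v - 1` run
-- forever; on the remaining corners where A does return (whitespace-padded or equal signed
-- chunks, e.g. ['-1','-1']) B returns the very same value, see the cited examples.
def Pre_filter_bssids_by_similarity (bssids : List String) (distance_threshold : Int) : Prop :=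
  ∀ s ∈ bssids, (s.toList.all (fun c =>  -- '0'-'9', 'a'-'f', 'A'-'F'
    (48 ≤ c.toNat && c.toNat ≤ 57) || (97 ≤ c.toNat && c.toNat ≤ 102) ||
    (65 ≤ c.toNat && c.toNat ≤ 70))) = true
instance (bssids : List String) (distance_threshold : Int) : Decidable (Pre_filter_bssids_by_similarity bssids distance_threshold) := by unfold Pre_filter_bssids_by_similarity; infer_instance

def pvWitness_filter_bssids_by_similarity : List String × Int := (["0101", "0102", "0a0a", "f"], 2)

def Spec_filter_bssids_by_similarity (bssids : List String) (distance_threshold : Int) (out : List String) : Prop := out = filter_bssids_by_similarity_alt bssids distance_threshold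
instance (bssids : List String) (distance_threshold : Int) (out : List String) : Decidable (Spec_filter_bssids_by_similarity bssids distance_threshold out) := by unfold Spec_filter_bssids_by_similarity; infer_instance

-- ===== CLAIM (what is proved, stated in full; the proofs are below) =====
def Claim_equal_filter_bssids_by_similarity : Prop := ∀ (bssids : List String) (distance_threshold : Int), Dom_filter_bssids_by_similarity bssids distance_threshold → Pre_filter_bssids_by_similarity bssids distance_threshold → Spec_filter_bssids_by_similarity bssids distance_threshold (filter_bssids_by_similarity bssids distance_threshold)

-- ===== LEMMAS AND PROOFS =====

-- The threshold graph on indices, its reachability relation, and "i is the least index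
-- of its connected component" — the common characterisation both programs are reduced to.
def Edge (bssids : List String) (t : Int) (x y : Nat) : Prop :=
  x < bssids.length ∧ y < bssids.length ∧
    bssidDiff (bssids.getD x "") (bssids.getD y "") ≤ t

def Reach (bssids : List String) (t : Int) : Nat → Nat → Prop :=
  Relation.ReflTransGen (Edge bssids t)

def IsRep (bssids : List String) (t : Int) (i : Nat) : Prop :=
  ∀ j, Reach bssids t i j → i ≤ j

-- symmetry of the metric and of reachability
theorem byteDiff_comm (a b : Int) : byteDiff a b = byteDiff b a := by
  unfold byteDiff hamming
  rw [abs_sub_comm, PySem.Int.bxor_comm]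

theorem pairDiff_comm (p q : List Int) : pairDiff p q = pairDiff q p := by
  induction p generalizing q with
  | nil => cases q <;> rfl
  | cons x p ih =>
    cases q with
    | nil => rfl
    | cons y q =>
      show byteDiff x y + pairDiff p q = byteDiff y x + pairDiff q p
      rw [byteDiff_comm, ih]

theorem bssidDiff_comm (a b : String) : bssidDiff a b = bssidDiff b a := pairDiff_comm _ _

theorem edge_symm (bssids : List String) (t : Int) : Symmetric (Edge bssids t) := by
  intro x y ⟨hx, hy, hd⟩
  exact ⟨hy, hx, by rwa [bssidDiff_comm]⟩

theorem reach_symm (bssids : List String) (t : Int) {x y : Nat}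
    (h : Reach bssids t x y) : Reach bssids t y x :=
  Relation.ReflTransGen.symmetric (edge_symm bssids t) h

-- ---------- generic helpers ----------

theorem headD_mem {c : List Nat} (h : c ≠ []) : c.headD 0 ∈ c := by
  cases c with
  | nil => exact absurd rfl h
  | cons a l => exact List.mem_cons_self

theorem headD_append {a b : List Nat} (h : a ≠ []) : (a ++ b).headD 0 = a.headD 0 := by
  cases a with
  | nil => exact absurd rfl h
  | cons x l => rfl

theorem getD_map_lt {α β : Type} (l : List α) (f : α → β) (i : Nat) (d : α) (e : β)
    (h : i < l.length) : (l.map f).getD i e = f (l.getD i d) := by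
  rw [List.getD_eq_getElem _ _ (by simpa using h), List.getD_eq_getElem _ _ h, List.getElem_map]

theorem full_of_nodup_lt {l : List Nat} {n : Nat} (hn : l.Nodup)
    (hs : ∀ x ∈ l, x < n) (hl : n ≤ l.length) : ∀ j < n, j ∈ l := by
  classical
  have h1 : l.toFinset ⊆ Finset.range n := by
    intro x hx; simp only [List.mem_toFinset] at hx; simpa using hs x hx
  have hc : l.toFinset.card = n := le_antisymm
    (by simpa [Finset.card_range] using Finset.card_le_card h1)
    (by rw [List.toFinset_card_of_nodup hn]; exact hl)
  have : l.toFinset = Finset.range n := Finset.eq_of_subset_of_card_le h1 (by simp [hc])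
  intro j hj
  have : j ∈ l.toFinset := this ▸ (by simpa using hj)
  simpa using this

-- ---------- the min?-characterisation of cluster distance ----------

theorem clusterDist_le_iff (matrix : List (List Int)) (t : Int) (a b : List Nat)
    (ha : a ≠ []) (hb : b ≠ []) :
    clusterDist matrix a b ≤ t ↔ ∃ i ∈ a, ∃ j ∈ b, (matrix.getD i []).getD j 0 ≤ t := by
  unfold clusterDist
  set l := a.flatMap (fun i => b.map (fun j => (matrix.getD i []).getD j 0)) with hl
  have hlne : l ≠ [] := by
    rw [hl]
    simp only [ne_eq, List.flatMap_eq_nil_iff, not_forall]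
    obtain ⟨x, hx⟩ := List.exists_mem_of_ne_nil a ha
    exact ⟨x, hx, by simpa using hb⟩
  obtain ⟨m, hm⟩ : ∃ m, l.min? = some m := by
    cases h : l.min? with
    | none => exact absurd (List.min?_eq_none_iff.mp h) hlne
    | some m => exact ⟨m, rfl⟩
  obtain ⟨hmmem, hmle⟩ := List.min?_eq_some_iff.mp hm
  rw [hm]
  constructor
  · intro hle
    simp only [hl, List.mem_flatMap, List.mem_map] at hmmem
    obtain ⟨i, hi, j, hj, he⟩ := hmmem
    exact ⟨i, hi, j, hj, by rw [he]; exact hle⟩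
  · rintro ⟨i, hi, j, hj, he⟩
    have : (matrix.getD i []).getD j 0 ∈ l := by
      simp only [hl, List.mem_flatMap, List.mem_map]
      exact ⟨i, hi, j, hj, rfl⟩
    exact le_trans (by simpa using hmle _ this) he

theorem matrix_entry (bssids : List String) {x y : Nat}
    (hx : x < bssids.length) (hy : y < bssids.length) :
    ((matrixOf bssids).getD x []).getD y 0 = bssidDiff (bssids.getD y "") (bssids.getD x "") := by
  unfold matrixOf
  rw [getD_map_lt _ _ _ "" _ hx, getD_map_lt _ _ _ "" _ hy]

-- ---------- findPair / findMerge specification ----------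

theorem findPair_some {p : Nat → Nat → Bool} :
    ∀ {is js : List Nat} {i j : Nat}, findPair p is js = some (i, j) →
      (∃ is1 is2, is = is1 ++ i :: is2 ∧ ∀ a ∈ is1, ∀ b ∈ js, p a b = false) ∧
      (∃ js1 js2, js = js1 ++ j :: js2 ∧ ∀ b ∈ js1, p i b = false) ∧ p i j = true := by
  intro is
  induction is with
  | nil => intro js i j h; simp [findPair] at h
  | cons a as ih =>
    intro js i j h
    unfold findPair at h
    cases hf : js.find? (p a) with
    | some j' =>
      rw [hf] at h
      injection h with h'
      obtain ⟨h1, h2⟩ := Prod.mk.inj h'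
      subst h1; subst h2
      have := List.find?_eq_some_iff_append.mp hf
      refine ⟨⟨[], as, rfl, by simp⟩, ?_, this.1⟩
      obtain ⟨_, js1, js2, he, hfa⟩ := this
      exact ⟨js1, js2, he, fun b hb => by simpa using hfa b hb⟩
    | none =>
      rw [hf] at h
      obtain ⟨⟨is1, is2, he, hfa⟩, hj, hp⟩ := ih h
      refine ⟨⟨a :: is1, is2, by rw [he]; rfl, ?_⟩, hj, hp⟩
      intro a' ha' b hb
      rcases List.mem_cons.mp ha' with h1 | h1
      · subst h1; simpa using List.find?_eq_none.mp hf b hb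
      · exact hfa a' h1 b hb

theorem findPair_none {p : Nat → Nat → Bool} :
    ∀ {is js : List Nat}, findPair p is js = none →
      ∀ i ∈ is, ∀ j ∈ js, p i j = false := by
  intro is
  induction is with
  | nil => intro js _ i hi; simp at hi
  | cons a as ih =>
    intro js h i hi j hj
    unfold findPair at h
    cases hf : js.find? (p a) with
    | some j' => rw [hf] at h; exact absurd h (by simp)
    | none =>
      rw [hf] at h
      rcases List.mem_cons.mp hi with h1 | h1
      · subst h1; simpa using List.find?_eq_none.mp hf j hj
      · exact ih h i h1 j hj

theorem range_decomp {n i : Nat} {l1 l2 : List Nat} (h : List.range n = l1 ++ i :: l2) :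
    i = l1.length ∧ ∀ a ∈ l1, a < i := by
  have hlen : l1.length < n := by
    have := congrArg List.length h
    simp at this
    omega
  have hi : i = l1.length := by
    have h2 : (List.range n)[l1.length]'(by simpa using hlen) = i := by
      simp only [h]
      rw [List.getElem_append_right (le_refl _)]
      simp
    rw [List.getElem_range] at h2
    exact h2.symm
  refine ⟨hi, fun a ha => ?_⟩
  have h1 : l1 = (List.range n).take l1.length := by
    rw [h, List.take_left' rfl]
  have : a ∈ List.range (min l1.length n) := by
    rw [← List.take_range]; rw [← h1]; exact ha
  rw [List.mem_range] at this
  omega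

-- ---------- the A-side invariant ----------

def InvA (bssids : List String) (t : Int) (cl : List (List Nat)) : Prop :=
  cl.flatten.Perm (List.range bssids.length) ∧
  (∀ c ∈ cl, c ≠ []) ∧
  (∀ c ∈ cl, ∀ x ∈ c, Reach bssids t (c.headD 0) x) ∧
  (∀ c ∈ cl, ∀ x ∈ c, c.headD 0 ≤ x) ∧
  cl.Pairwise (fun c d => c.headD 0 < d.headD 0)

theorem mem_flatten_lt {bssids : List String} {t : Int} {cl : List (List Nat)}
    (hInv : InvA bssids t cl) {c : List Nat} (hc : c ∈ cl) {x : Nat} (hx : x ∈ c) :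
    x < bssids.length := by
  have : x ∈ cl.flatten := List.mem_flatten.mpr ⟨c, hc, hx⟩
  have := hInv.1.mem_iff.mp this
  simpa using this

theorem mergeCond_iff {bssids : List String} {t : Int} {cl : List (List Nat)}
    (hInv : InvA bssids t cl) {i j : Nat} (hi : i < cl.length) (hj : j < cl.length) :
    mergeCond (matrixOf bssids) t cl i j = true ↔
      i ≠ j ∧ ∃ x ∈ cl[i], ∃ y ∈ cl[j], Edge bssids t x y := by
  unfold mergeCond
  rw [List.getD_eq_getElem _ _ hi, List.getD_eq_getElem _ _ hj]
  have hne1 : cl[i] ≠ [] := hInv.2.1 _ (List.getElem_mem hi)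
  have hne2 : cl[j] ≠ [] := hInv.2.1 _ (List.getElem_mem hj)
  rw [Bool.and_eq_true, decide_eq_true_iff,
    clusterDist_le_iff _ _ _ _ hne1 hne2]
  constructor
  · rintro ⟨hij, x, hx, y, hy, hd⟩
    have hxn : x < bssids.length := mem_flatten_lt hInv (List.getElem_mem hi) hx
    have hyn : y < bssids.length := mem_flatten_lt hInv (List.getElem_mem hj) hy
    rw [matrix_entry bssids hxn hyn] at hd
    refine ⟨by simpa using hij, x, hx, y, hy, hxn, hyn, ?_⟩
    rwa [bssidDiff_comm]
  · rintro ⟨hij, x, hx, y, hy, hxn, hyn, hd⟩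
    refine ⟨by simpa using hij, x, hx, y, hy, ?_⟩
    rw [matrix_entry bssids hxn hyn, bssidDiff_comm]
    exact hd

theorem findMerge_some {bssids : List String} {t : Int} {cl : List (List Nat)}
    (hInv : InvA bssids t cl) {i j : Nat}
    (h : findMerge (matrixOf bssids) t cl = some (i, j)) :
    ∃ hi : i < cl.length, ∃ hj : j < cl.length, i < j ∧
      ∃ x ∈ cl[i], ∃ y ∈ cl[j], Edge bssids t x y := by
  obtain ⟨⟨is1, is2, hisr, hisf⟩, ⟨js1, js2, hjsr, hjsf⟩, hp⟩ := findPair_some h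
  obtain ⟨hieq, hilt⟩ := range_decomp hisr
  obtain ⟨hjeq, hjlt⟩ := range_decomp hjsr
  have hi : i < cl.length := by
    have := congrArg List.length hisr; simp at this; omega
  have hj : j < cl.length := by
    have := congrArg List.length hjsr; simp at this; omega
  obtain ⟨hij, hw⟩ := (mergeCond_iff hInv hi hj).mp hp
  refine ⟨hi, hj, ?_, hw⟩
  rcases Nat.lt_trichotomy i j with h1 | h1 | h1
  · exact h1
  · exact absurd h1 hij
  · -- j < i: then (j, i) was scanned earlier in the outer loop and must have failed
    exfalso
    obtain ⟨x, hx, y, hy, he⟩ := hw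
    have hsymm : mergeCond (matrixOf bssids) t cl j i = true :=
      (mergeCond_iff hInv hj hi).mpr ⟨fun he' => hij he'.symm, y, hy, x, hx, edge_symm bssids t he⟩
    have hjmem : j ∈ is1 := by
      have : j < i := h1
      have hmem : j ∈ List.range cl.length := List.mem_range.mpr hj
      rw [hisr] at hmem
      rcases List.mem_append.mp hmem with hm | hm
      · exact hm
      · rcases List.mem_cons.mp hm with hm | hm
        · omega
        · exfalso
          -- j ∈ is2 : but every element of is2 is > i (range is sorted); j < i, contra
          have : is2 = List.drop (is1.length + 1) (List.range cl.length) := by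
            rw [hisr]
            simp
          have hj2 : ∀ a ∈ is2, i < a := by
            intro a ha
            rw [this] at ha
            obtain ⟨k, hk, hkeq⟩ := List.getElem_of_mem (by exact ha)
            rw [List.getElem_drop] at hkeq
            simp [List.getElem_range] at hkeq
            omega
          exact absurd h1 (by have := hj2 j hm; omega)
    have := hisf j hjmem i (List.mem_range.mpr hi)
    rw [hsymm] at this
    exact Bool.true_eq_false.mp this

theorem findMerge_none {bssids : List String} {t : Int} {cl : List (List Nat)}
    (h : findMerge (matrixOf bssids) t cl = none) :
    ∀ i j, i < cl.length → j < cl.length → mergeCond (matrixOf bssids) t cl i j = false := by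
  intro i j hi hj
  exact findPair_none h i (List.mem_range.mpr hi) j (List.mem_range.mpr hj)

-- ---------- list surgery for one merge step ----------

theorem erase_decomp {α : Type} :
    ∀ (l : List α) (j : Nat) (hj : j < l.length),
      ∃ L2 L3, l = L2 ++ l[j] :: L3 ∧ l.eraseIdx j = L2 ++ L3 ∧ L2.length = j := by
  intro l
  induction l with
  | nil => intro j hj; simp at hj
  | cons c rest ih =>
    intro j hj
    cases j with
    | zero => exact ⟨[], rest, by simp, by simp, rfl⟩
    | succ jj =>
      obtain ⟨L2, L3, h1, h2, h3⟩ := ih jj (by simpa using hj)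
      refine ⟨c :: L2, L3, ?_, ?_, by simp [h3]⟩
      · simpa using congrArg (c :: ·) h1
      · simpa [List.eraseIdx_cons_succ] using congrArg (c :: ·) h2

theorem merge_decomp {α : Type} :
    ∀ (l : List α) (i j : Nat) (y : α) (hij : i < j) (hj : j < l.length),
      ∃ L1 L2 L3, l = L1 ++ l[i]'(by omega) :: L2 ++ l[j] :: L3 ∧
        (l.eraseIdx j).set i y = L1 ++ y :: L2 ++ L3 ∧ L1.length = i := by
  intro l
  induction l with
  | nil => intro i j y hij hj; simp at hj
  | cons c rest ih =>
    intro i j y hij hj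
    cases j with
    | zero => omega
    | succ jj =>
      cases i with
      | zero =>
        obtain ⟨L2, L3, h1, h2, h3⟩ := erase_decomp rest jj (by simpa using hj)
        refine ⟨[], L2, L3, ?_, ?_, rfl⟩
        · simpa using congrArg (c :: ·) h1
        · simp only [List.eraseIdx_cons_succ, List.set_cons_zero, h2]
          rfl
      | succ ii =>
        obtain ⟨L1, L2, L3, h1, h2, h3⟩ := ih ii jj y (by omega) (by simpa using hj)
        refine ⟨c :: L1, L2, L3, ?_, ?_, by simp [h3]⟩
        · simpa using congrArg (c :: ·) h1
        · simpa [List.eraseIdx_cons_succ, List.set_cons_succ] using congrArg (c :: ·) h2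

-- ---------- invariant: initialisation and preservation ----------

theorem invA_init (bssids : List String) (t : Int) :
    InvA bssids t ((List.range bssids.length).map (fun i => [i])) := by
  refine ⟨?_, ?_, ?_, ?_, ?_⟩
  · rw [show ((List.range bssids.length).map (fun i => [i])).flatten = List.range bssids.length by
      induction (List.range bssids.length) with
      | nil => rfl
      | cons a l ih => simp [ih]]
  · intro c hc
    obtain ⟨i, _, rfl⟩ := List.mem_map.mp hc
    simp
  · intro c hc x hx
    obtain ⟨i, _, rfl⟩ := List.mem_map.mp hc
    simp at hx
    subst hx
    exact Relation.ReflTransGen.refl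
  · intro c hc x hx
    obtain ⟨i, _, rfl⟩ := List.mem_map.mp hc
    simp at hx
    simp [hx]
  · rw [List.pairwise_map]
    have := List.pairwise_lt_range (n := bssids.length)
    exact this.imp (fun h => by simpa using h)

theorem invA_step {bssids : List String} {t : Int} {cl : List (List Nat)}
    (hInv : InvA bssids t cl) {i j : Nat}
    (h : findMerge (matrixOf bssids) t cl = some (i, j)) :
    InvA bssids t ((cl.eraseIdx j).set (if j < i then i - 1 else i)
      (cl.getD i [] ++ cl.getD j [])) := by
  obtain ⟨hi, hj, hij, x0, hx0, y0, hy0, he⟩ := findMerge_some hInv h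
  rw [if_neg (by omega), List.getD_eq_getElem _ _ hi, List.getD_eq_getElem _ _ hj]
  obtain ⟨L1, L2, L3, hcl, hnew, hL1⟩ := merge_decomp cl i j (cl[i] ++ cl[j]) hij hj
  set a := cl[i]'(by omega) with hadef
  set b := cl[j] with hbdef
  have hamem : a ∈ cl := List.getElem_mem _
  have hbmem : b ∈ cl := List.getElem_mem _
  have hane : a ≠ [] := hInv.2.1 _ hamem
  have hbne : b ≠ [] := hInv.2.1 _ hbmem
  have hheadab : (a ++ b).headD 0 = a.headD 0 := headD_append hane
  have hmem_cases : ∀ c, c ∈ L1 ++ (a ++ b) :: L2 ++ L3 → c ∈ cl ∨ c = a ++ b := by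
    intro c hc
    have h0 : c ∈ L1 ∨ c = a ++ b ∨ c ∈ L2 ∨ c ∈ L3 := by
      simpa [List.mem_append, List.mem_cons, or_assoc] using hc
    rcases h0 with h1 | h1 | h1 | h1
    · left; rw [hcl]; simp only [List.mem_append, List.mem_cons]; tauto
    · exact Or.inr h1
    · left; rw [hcl]; simp only [List.mem_append, List.mem_cons]; tauto
    · left; rw [hcl]; simp only [List.mem_append, List.mem_cons]; tauto
  -- the strict order between the two heads
  have hheadlt : a.headD 0 < b.headD 0 := by
    have hpw := hInv.2.2.2.2
    rw [hcl] at hpw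
    exact (List.pairwise_append.mp hpw).2.2 a (by simp) b List.mem_cons_self
  rw [hnew]
  refine ⟨?_, ?_, ?_, ?_, ?_⟩
  · -- flatten permutation
    have hperm : (L1 ++ (a ++ b) :: L2 ++ L3).flatten.Perm
        (L1 ++ a :: L2 ++ b :: L3).flatten := by
      simp only [List.flatten_append, List.flatten_cons, List.append_assoc]
      refine List.Perm.append_left _ ?_
      refine List.Perm.append_left _ ?_
      exact List.perm_append_comm_assoc b L2.flatten L3.flatten
    exact hperm.trans (hcl ▸ hInv.1)
  · -- nonempty
    intro c hc
    rcases hmem_cases c hc with h1 | h1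
    · exact hInv.2.1 c h1
    · subst h1; simp [hane]
  · -- connectivity from the head
    intro c hc x hx
    rcases hmem_cases c hc with h1 | h1
    · exact hInv.2.2.1 c h1 x hx
    · subst h1
      rw [hheadab]
      rcases List.mem_append.mp hx with h2 | h2
      · exact hInv.2.2.1 a hamem x h2
      · have r1 : Reach bssids t (a.headD 0) x0 := hInv.2.2.1 a hamem x0 hx0
        have r2 : Reach bssids t (b.headD 0) y0 := hInv.2.2.1 b hbmem y0 hy0
        have r3 : Reach bssids t (b.headD 0) x := hInv.2.2.1 b hbmem x h2
        exact ((r1.trans (Relation.ReflTransGen.single he)).trans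
          (reach_symm bssids t r2)).trans r3
  · -- the head is the minimum
    intro c hc x hx
    rcases hmem_cases c hc with h1 | h1
    · exact hInv.2.2.2.1 c h1 x hx
    · subst h1
      rw [hheadab]
      rcases List.mem_append.mp hx with h2 | h2
      · exact hInv.2.2.2.1 a hamem x h2
      · have := hInv.2.2.2.1 b hbmem x h2
        omega
  · -- heads strictly increasing
    rw [← List.pairwise_map (f := fun c : List Nat => c.headD 0)]
    have hmapeq : (L1 ++ (a ++ b) :: L2 ++ L3).map (fun c => c.headD 0) =
        (L1 ++ a :: L2 ++ L3).map (fun c => c.headD 0) := by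
      simp only [List.map_append, List.map_cons, hheadab]
    rw [hmapeq]
    have hsub : List.Sublist (L1 ++ a :: L2 ++ L3) (L1 ++ a :: L2 ++ b :: L3) := by
      apply List.Sublist.append_left
      exact List.sublist_cons_self b L3
    have := hInv.2.2.2.2
    rw [hcl] at this
    exact ((List.pairwise_map (f := fun c : List Nat => c.headD 0)).mpr this).sublist
      (hsub.map _)

theorem mergeLoop_eq_none {matrix : List (List Int)} {t : Int} {cl : List (List Nat)}
    (hfm : findMerge matrix t cl = none) : mergeLoop matrix t cl = cl := by
  rw [mergeLoop, hfm]

theorem mergeLoop_eq_some {matrix : List (List Int)} {t : Int} {cl : List (List Nat)}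
    {i j : Nat} (hfm : findMerge matrix t cl = some (i, j)) (hj : j < cl.length) :
    mergeLoop matrix t cl = mergeLoop matrix t
      ((cl.eraseIdx j).set (if j < i then i - 1 else i)
        (cl.getD i [] ++ cl.getD j [])) := by
  conv_lhs => rw [mergeLoop, hfm]
  exact dif_pos hj

theorem mergeLoop_invA (bssids : List String) (t : Int) :
    ∀ cl, InvA bssids t cl →
      InvA bssids t (mergeLoop (matrixOf bssids) t cl) ∧
      findMerge (matrixOf bssids) t (mergeLoop (matrixOf bssids) t cl) = none := by
  have H : ∀ n cl, cl.length < n → InvA bssids t cl →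
      InvA bssids t (mergeLoop (matrixOf bssids) t cl) ∧
      findMerge (matrixOf bssids) t (mergeLoop (matrixOf bssids) t cl) = none := by
    intro n
    induction n with
    | zero => intro cl h; omega
    | succ n ih =>
      intro cl hlen hInv
      cases hfm : findMerge (matrixOf bssids) t cl with
      | none => rw [mergeLoop_eq_none hfm]; exact ⟨hInv, hfm⟩
      | some pr =>
        obtain ⟨i, j⟩ := pr
        obtain ⟨hi, hj, hij, -⟩ := findMerge_some hInv hfm
        rw [mergeLoop_eq_some hfm hj]
        exact ih _ (by rw [List.length_set, List.length_eraseIdx_of_lt hj]; omega)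
          (invA_step hInv hfm)
  exact fun cl h => H (cl.length + 1) cl (by omega) h

-- ---------- final-state characterisation (A side) ----------

theorem final_closed {bssids : List String} {t : Int} {cl : List (List Nat)}
    (hInv : InvA bssids t cl)
    (hnone : findMerge (matrixOf bssids) t cl = none)
    {p : Nat} (hp : p < cl.length) {x y : Nat} (hx : x ∈ cl[p])
    (he : Edge bssids t x y) : y ∈ cl[p] := by
  have hyn : y < bssids.length := he.2.1
  have : y ∈ cl.flatten := hInv.1.mem_iff.mpr (by simpa using hyn)
  obtain ⟨c, hc, hyc⟩ := List.mem_flatten.mp this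
  obtain ⟨q, hq, rfl⟩ := List.getElem_of_mem hc
  by_cases hpq : p = q
  · subst hpq; exact hyc
  · exfalso
    have := findMerge_none hnone p q hp hq
    have h2 : mergeCond (matrixOf bssids) t cl p q = true :=
      (mergeCond_iff hInv hp hq).mpr ⟨hpq, x, hx, y, hyc, he⟩
    rw [h2] at this
    exact Bool.true_eq_false.mp this

theorem final_class {bssids : List String} {t : Int} {cl : List (List Nat)}
    (hInv : InvA bssids t cl)
    (hnone : findMerge (matrixOf bssids) t cl = none)
    {p : Nat} (hp : p < cl.length) {x : Nat} (hx : x ∈ cl[p]) :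
    ∀ j, Reach bssids t x j → j ∈ cl[p] := by
  intro j hj
  induction hj with
  | refl => exact hx
  | tail _ e ih => exact final_closed hInv hnone hp ih e

-- everything below is scaffolding for the two halves of the proof
theorem main_A (bssids : List String) (t : Int) :
    ∃ heads : List Nat,
      (mergeLoop (matrixOf bssids) t ((List.range bssids.length).map (fun i => [i]))).map
          (fun c => c.headD 0) = heads ∧
      heads.Pairwise (· < ·) ∧
      (∀ x, x ∈ heads ↔ x < bssids.length ∧ IsRep bssids t x) := by
  obtain ⟨hInvF, hnone⟩ :=
    mergeLoop_invA bssids t _ (invA_init bssids t)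
  set F := mergeLoop (matrixOf bssids) t ((List.range bssids.length).map (fun i => [i])) with hF
  refine ⟨F.map (fun c => c.headD 0), rfl, ?_, ?_⟩
  · exact List.pairwise_map.mpr hInvF.2.2.2.2
  · intro x
    constructor
    · intro hx
      obtain ⟨c, hc, rfl⟩ := List.mem_map.mp hx
      obtain ⟨p, hp, rfl⟩ := List.getElem_of_mem hc
      have hcne : F[p] ≠ [] := hInvF.2.1 _ hc
      have hhead : F[p].headD 0 ∈ F[p] := headD_mem hcne
      refine ⟨mem_flatten_lt hInvF hc hhead, ?_⟩
      intro jj hr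
      exact hInvF.2.2.2.1 _ hc jj (final_class hInvF hnone hp hhead jj hr)
    · rintro ⟨hxn, hrep⟩
      have hxf : x ∈ F.flatten := hInvF.1.mem_iff.mpr (by simpa using hxn)
      obtain ⟨c, hc, hxc⟩ := List.mem_flatten.mp hxf
      have h1 : Reach bssids t (c.headD 0) x := hInvF.2.2.1 _ hc _ hxc
      have h2 := hrep _ (reach_symm bssids t h1)
      have h3 := hInvF.2.2.2.1 _ hc _ hxc
      exact List.mem_map.mpr ⟨c, hc, by omega⟩

-- ---------- B side: the closure computes reachability ----------

theorem adj_entry (bssids : List String) (t : Int) {k j : Nat}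
    (hk : k < bssids.length) (hj : j < bssids.length) :
    (((adjOf (bssids.map (fun s => bytesOfHex s.toList)) t).getD k []).getD j false) =
      decide (bssidDiff (bssids.getD k "") (bssids.getD j "") ≤ t) := by
  unfold adjOf
  rw [getD_map_lt _ _ _ [] _ (by simpa using hk)]
  rw [getD_map_lt _ _ _ [] _ (by simpa using hj)]
  rw [getD_map_lt _ _ _ "" _ hk, getD_map_lt _ _ _ "" _ hj]
  rfl

theorem adj_true_iff (bssids : List String) (t : Int) {k j : Nat}
    (hk : k < bssids.length) (hj : j < bssids.length) :
    ((((adjOf (bssids.map (fun s => bytesOfHex s.toList)) t).getD k []).getD j false) = true)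
      ↔ Edge bssids t k j := by
  rw [adj_entry bssids t hk hj]
  simp only [decide_eq_true_iff, Edge]
  exact ⟨fun h => ⟨hk, hj, h⟩, fun h => h.2.2⟩

theorem expandOnce_mem (bssids : List String) (t : Int) (comp : List Nat)
    (hsub : ∀ x ∈ comp, x < bssids.length) (j : Nat) :
    j ∈ expandOnce (adjOf (bssids.map (fun s => bytesOfHex s.toList)) t) bssids.length comp ↔
      j < bssids.length ∧ j ∉ comp ∧ ∃ k ∈ comp, Edge bssids t k j := by
  unfold expandOnce
  simp only [List.mem_filter, List.mem_range]
  constructor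
  · rintro ⟨hjn, hb⟩
    rw [Bool.and_eq_true] at hb
    have hnm : j ∉ comp := by simpa using hb.1
    obtain ⟨k, hk, hadj⟩ := List.any_eq_true.mp hb.2
    exact ⟨hjn, hnm, k, hk, (adj_true_iff bssids t (hsub k hk) hjn).mp hadj⟩
  · rintro ⟨hjn, hnm, k, hk, he⟩
    refine ⟨hjn, ?_⟩
    rw [Bool.and_eq_true]
    exact ⟨by simpa using hnm,
      List.any_eq_true.mpr ⟨k, hk, (adj_true_iff bssids t (hsub k hk) hjn).mpr he⟩⟩

def ClosedS (bssids : List String) (t : Int) (S : List Nat) : Prop :=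
  ∀ k ∈ S, ∀ j, Edge bssids t k j → j ∈ S

theorem closed_reach {bssids : List String} {t : Int} {S : List Nat}
    (hcl : ClosedS bssids t S) {i : Nat} (hi : i ∈ S) :
    ∀ j, Reach bssids t i j → j ∈ S := by
  intro j h
  induction h with
  | refl => exact hi
  | tail _ e ih => exact hcl _ ih _ e

theorem closureLoop_spec (bssids : List String) (t : Int) (i : Nat) :
    ∀ (fuel : Nat) (comp : List Nat), comp.Nodup → (∀ x ∈ comp, x < bssids.length) →
      i ∈ comp → (∀ x ∈ comp, Reach bssids t i x) →
      bssids.length - comp.length ≤ fuel →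
      (∀ x ∈ closureLoop (adjOf (bssids.map (fun s => bytesOfHex s.toList)) t)
          bssids.length fuel comp, Reach bssids t i x) ∧
      i ∈ closureLoop (adjOf (bssids.map (fun s => bytesOfHex s.toList)) t)
          bssids.length fuel comp ∧
      ClosedS bssids t (closureLoop (adjOf (bssids.map (fun s => bytesOfHex s.toList)) t)
          bssids.length fuel comp) := by
  intro fuel
  induction fuel with
  | zero =>
    intro comp hnd hsub hmem hreach hfuel
    have hfull : ∀ j < bssids.length, j ∈ comp :=
      full_of_nodup_lt hnd hsub (by omega)
    exact ⟨hreach, hmem, fun k _ j he => hfull j he.2.1⟩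
  | succ f ih =>
    intro comp hnd hsub hmem hreach hfuel
    rw [closureLoop]
    cases hadd : (expandOnce (adjOf (bssids.map (fun s => bytesOfHex s.toList)) t)
        bssids.length comp).isEmpty with
    | true =>
      rw [if_pos rfl]
      have hempty : expandOnce (adjOf (bssids.map (fun s => bytesOfHex s.toList)) t)
          bssids.length comp = [] := List.isEmpty_iff.mp hadd
      refine ⟨hreach, hmem, ?_⟩
      intro k hk j he
      by_contra hj
      have : j ∈ expandOnce (adjOf (bssids.map (fun s => bytesOfHex s.toList)) t)
          bssids.length comp :=
        (expandOnce_mem bssids t comp hsub j).mpr ⟨he.2.1, hj, k, hk, he⟩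
      rw [hempty] at this
      exact absurd this (List.not_mem_nil)
    | false =>
      rw [if_neg (by simp)]
      set add := expandOnce (adjOf (bssids.map (fun s => bytesOfHex s.toList)) t)
        bssids.length comp with hadddef
      have haddmem := expandOnce_mem bssids t comp hsub
      have haddnd : add.Nodup := List.Nodup.filter _ (List.nodup_range)
      have haddne : add ≠ [] := by
        intro h; rw [h] at hadd; simp at hadd

      have hdisj : ∀ a ∈ comp, ∀ b ∈ add, a ≠ b := by
        intro a ha b hb h
        exact ((haddmem b).mp hb).2.1 (h ▸ ha)
      refine ih (comp ++ add) (List.nodup_append.mpr ⟨hnd, haddnd, hdisj⟩) ?_ ?_ ?_ ?_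
      · intro x hx
        rcases List.mem_append.mp hx with h1 | h1
        · exact hsub x h1
        · exact ((haddmem x).mp h1).1
      · exact List.mem_append.mpr (Or.inl hmem)
      · intro x hx
        rcases List.mem_append.mp hx with h1 | h1
        · exact hreach x h1
        · obtain ⟨-, -, k, hk, he⟩ := (haddmem x).mp h1
          exact (hreach k hk).tail he
      · have h1 : 0 < add.length := List.length_pos_of_ne_nil haddne
        rw [List.length_append]
        omega

theorem mem_closure (bssids : List String) (t : Int) {i : Nat} (hi : i < bssids.length) :
    ∀ x, x ∈ closureLoop (adjOf (bssids.map (fun s => bytesOfHex s.toList)) t)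
        bssids.length bssids.length [i] ↔ Reach bssids t i x := by
  obtain ⟨h1, h2, h3⟩ := closureLoop_spec bssids t i bssids.length [i]
    (by simp) (by simpa using hi) (by simp)
    (by intro x hx; simp at hx; subst hx; exact Relation.ReflTransGen.refl)
    (by simp)
  exact fun x => ⟨h1 x, fun hr => closed_reach h3 h2 x hr⟩

theorem scan_spec (bssids : List String) (t : Int) :
    ∀ m, m ≤ bssids.length →
      ∃ reps : List Nat,
        ((List.range m).foldl
            (scanStep (adjOf (bssids.map (fun s => bytesOfHex s.toList)) t) bssids.length bssids)
            (PySem.Set.empty, [])).2 = reps.map (fun i => bssids.getD i "") ∧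
        reps.Pairwise (· < ·) ∧
        (∀ x, x ∈ reps ↔ x < m ∧ IsRep bssids t x) ∧
        (∀ j, j ∈ ((List.range m).foldl
            (scanStep (adjOf (bssids.map (fun s => bytesOfHex s.toList)) t) bssids.length bssids)
            (PySem.Set.empty, [])).1 ↔ ∃ k < m, Reach bssids t k j) := by
  intro m
  induction m with
  | zero =>
    intro _
    exact ⟨[], rfl, List.Pairwise.nil, fun x => by simp, fun j => by simp [PySem.Set.empty]⟩
  | succ m ih =>
    intro hm
    obtain ⟨reps, hout, hpw, hmemr, hseen⟩ := ih (by omega)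
    set st := ((List.range m).foldl
      (scanStep (adjOf (bssids.map (fun s => bytesOfHex s.toList)) t) bssids.length bssids)
      (PySem.Set.empty, [])) with hst
    rw [List.range_succ, List.foldl_append, List.foldl_cons, List.foldl_nil]
    rw [← hst]
    unfold scanStep
    by_cases hc : PySem.Set.contains st.1 m
    · rw [if_pos hc]
      have hm_seen : ∃ k < m, Reach bssids t k m :=
        (hseen m).mp ((PySem.Set.contains_iff st.1 m).mp hc)
      have hnotrep : ¬ IsRep bssids t m := by
        intro hrep
        obtain ⟨k, hk, hr⟩ := hm_seen
        exact absurd (hrep k (reach_symm bssids t hr)) (by omega)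
      refine ⟨reps, hout, hpw, ?_, ?_⟩
      · intro x
        rw [hmemr x]
        constructor
        · rintro ⟨h1, h2⟩; exact ⟨by omega, h2⟩
        · rintro ⟨h1, h2⟩
          refine ⟨?_, h2⟩
          rcases Nat.lt_or_ge x m with h | h
          · exact h
          · exfalso; have : x = m := by omega
            subst this; exact hnotrep h2
      · intro j
        rw [hseen j]
        constructor
        · rintro ⟨k, hk, hr⟩; exact ⟨k, by omega, hr⟩
        · rintro ⟨k, hk, hr⟩
          rcases Nat.lt_or_ge k m with h | h
          · exact ⟨k, h, hr⟩
          · have : k = m := by omega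
            subst this
            obtain ⟨k0, hk0, hr0⟩ := hm_seen
            exact ⟨k0, hk0, hr0.trans hr⟩
    · rw [if_neg hc]
      have hmn : m < bssids.length := by omega
      have hnotseen : ¬ ∃ k < m, Reach bssids t k m := by
        rw [← hseen m]
        intro h
        exact hc ((PySem.Set.contains_iff st.1 m).mpr h)
      have hrepm : IsRep bssids t m := by
        intro j hr
        by_contra hlt
        exact hnotseen ⟨j, by omega, reach_symm bssids t hr⟩
      refine ⟨reps ++ [m], ?_, ?_, ?_, ?_⟩
      · simp only [List.map_append, List.map_cons, List.map_nil]
        rw [hout]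
      · rw [List.pairwise_append]
        refine ⟨hpw, by simp, ?_⟩
        intro x hx y hy
        simp at hy
        subst hy
        rcases (hmemr x).mp hx with ⟨h1, -⟩
        exact h1
      · intro x
        simp only [List.mem_append, List.mem_singleton]
        constructor
        · rintro (h | h)
          · rcases (hmemr x).mp h with ⟨h1, h2⟩; exact ⟨by omega, h2⟩
          · subst h; exact ⟨by omega, hrepm⟩
        · rintro ⟨h1, h2⟩
          rcases Nat.lt_or_ge x m with h | h
          · exact Or.inl ((hmemr x).mpr ⟨h, h2⟩)
          · right; omega
      · intro j
        rw [PySem.Set.mem_union]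
        rw [hseen j, mem_closure bssids t hmn j]
        constructor
        · rintro (⟨k, hk, hr⟩ | hr)
          · exact ⟨k, by omega, hr⟩
          · exact ⟨m, by omega, hr⟩
        · rintro ⟨k, hk, hr⟩
          rcases Nat.lt_or_ge k m with h | h
          · exact Or.inl ⟨k, h, hr⟩
          · have : k = m := by omega
            subst this
            exact Or.inr hr

theorem main_B (bssids : List String) (t : Int) :
    ∃ reps : List Nat,
      filter_bssids_by_similarity_alt bssids t = reps.map (fun i => bssids.getD i "") ∧
      reps.Pairwise (· < ·) ∧
      (∀ x, x ∈ reps ↔ x < bssids.length ∧ IsRep bssids t x) := by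
  obtain ⟨reps, hout, hpw, hmemr, -⟩ := scan_spec bssids t bssids.length (le_refl _)
  exact ⟨reps, by simpa [filter_bssids_by_similarity_alt] using hout, hpw, hmemr⟩

theorem lists_eq_of_pairwise_lt_mem (l l' : List Nat)
    (h : l.Pairwise (· < ·)) (h' : l'.Pairwise (· < ·))
    (m : ∀ x, x ∈ l ↔ x ∈ l') : l = l' := by
  have hn : l.Nodup := h.imp Nat.ne_of_lt
  have hn' : l'.Nodup := h'.imp Nat.ne_of_lt
  exact PySem.List.eq_of_perm_of_pairwise_le
    ((List.perm_ext_iff_of_nodup hn hn').mpr m)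
    (h.imp Nat.le_of_lt) (h'.imp Nat.le_of_lt)

-- ===== VERDICT (by name: the statement is the Claim_ definition above) =====
theorem filter_bssids_by_similarity_spec : Claim_equal_filter_bssids_by_similarity := by
  intro bssids t _ _
  unfold Spec_filter_bssids_by_similarity
  obtain ⟨heads, hA, hsA, hmA⟩ := main_A bssids t
  obtain ⟨reps, hB, hsB, hmB⟩ := main_B bssids t
  have : heads = reps := lists_eq_of_pairwise_lt_mem _ _ hsA hsB
    (fun x => (hmA x).trans (hmB x).symm)
  unfold filter_bssids_by_similarity
  rw [show (mergeLoop (matrixOf bssids) t ((List.range bssids.length).map (fun i => [i]))).map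
      (fun c => bssids.getD (c.headD 0) "") =
      ((mergeLoop (matrixOf bssids) t ((List.range bssids.length).map (fun i => [i]))).map
      (fun c => c.headD 0)).map (fun i => bssids.getD i "") by rw [List.map_map]; rfl]
  rw [hA, this, ← hB]
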